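-- pv_equiv track=rewrite | github.com/Sebastianjaimes-sepc/Metahuristica | src/encoding.py | decode_vector
-- ===== SOURCE A (Python) =====
-- from typing import List, Tuple
--
-- DEPOT = 0
--
-- def decode_vector(vec: List[int]) -> List[List[int]]:
--     routes = []
--     current = []
--     first = True
--     for x in vec:
--         if x == DEPOT:
--             if first:
--                 first = False
--             else:
--                 routes.append(current)
--                 current = []
--         else:
--             current.append(int(x))
--     # Note: last depot closes last route; if not, append
--     return routes
-- ===== SOURCE B (Python) =====
-- def decode_vector(vec):
--     zeros = [i for i, x in enumerate(vec) if x == 0]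
--     routes = []
--     boundary = 0
--     for z in zeros[1:]:
--         routes.append([int(x) for x in vec[boundary:z] if x != 0])
--         boundary = z
--     return routes
-- ===== Notes on version B (the rewrite author's own statement) =====
-- stated objective: alternative
-- what changed: B first collects the depot (zero) positions with enumerate, then builds each route by slicing the vector between consecutive boundaries, instead of A's single stateful pass with routes/current/first accumulators.
import Mathlib
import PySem

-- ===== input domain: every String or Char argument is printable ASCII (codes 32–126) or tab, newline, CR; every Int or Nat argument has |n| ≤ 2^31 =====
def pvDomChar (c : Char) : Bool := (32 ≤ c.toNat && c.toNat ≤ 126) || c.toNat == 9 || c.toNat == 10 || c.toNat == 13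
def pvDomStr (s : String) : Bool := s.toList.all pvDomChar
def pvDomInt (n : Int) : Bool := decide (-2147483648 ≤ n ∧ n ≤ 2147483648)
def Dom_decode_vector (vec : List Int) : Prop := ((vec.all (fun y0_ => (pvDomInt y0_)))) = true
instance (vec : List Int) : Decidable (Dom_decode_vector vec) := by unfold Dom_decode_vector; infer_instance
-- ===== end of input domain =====

-- B replaces A's stateful accumulator loop by a depot-index list with slicing (alternative decomposition, same cost).

-- ===== PORT A =====
-- literal port of A: one fold over vec carrying (routes, current, first); loop body as named helper
def pvStepA (st : List (List Int) × List Int × Bool) (x : Int) : List (List Int) × List Int × Bool :=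
  if x == 0 then
    if st.2.2 then (st.1, st.2.1, false)
    else (st.1 ++ [st.2.1], [], false)
  else (st.1, st.2.1 ++ [x], st.2.2)

def decode_vector (vec : List Int) : List (List Int) :=
  (vec.foldl pvStepA ([], [], true)).1

-- ===== PORT B =====
-- literal port of B: zero positions via enumerate, then a fold over zeros[1:] slicing vec
def pvStepB (vec : List Int) (acc : List (List Int) × Int) (z : Int) : List (List Int) × Int :=
  (acc.1 ++ [(PySem.List.slice vec (some acc.2) (some z)).filter (fun x => x != 0)], z)

def decode_vector_alt (vec : List Int) : List (List Int) :=
  let zeros := ((PySem.List.enumerate vec 0).filter (fun p => p.2 == 0)).map (fun p => p.1)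
  ((zeros.drop 1).foldl (pvStepB vec) ([], 0)).1

-- ===== PRECONDITION & SPEC =====
def Spec_decode_vector (vec : List Int) (out : List (List Int)) : Prop := out = decode_vector_alt vec
instance (vec : List Int) (out : List (List Int)) : Decidable (Spec_decode_vector vec out) := by unfold Spec_decode_vector; infer_instance

-- ===== CLAIM (what is proved, stated in full; the proofs are below) =====
def Claim_equal_decode_vector : Prop := ∀ (vec : List Int), Dom_decode_vector vec → Spec_decode_vector vec (decode_vector vec)

-- ===== LEMMAS AND PROOFS =====

-- Nat positions of zeros in a list
def pvZeros : List Int → List Nat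
  | [] => []
  | x :: t => if x = 0 then 0 :: (pvZeros t).map (· + 1) else (pvZeros t).map (· + 1)

-- recursive form of B's fold: one route per consecutive boundary pair
def pvPf (vec : List Int) : Nat → List Nat → List (List Int)
  | _, [] => []
  | b, z :: zs => ((vec.drop b).take (z - b)).filter (fun x => x != 0) :: pvPf vec z zs

-- common target: splitOnP-based characterization (merge first two parts, drop last)
def pvA2 (c : List Int) (t : List Int) : List (List Int) :=
  ((List.splitOnP (fun x => x == (0:Int)) t).tail.modifyHead
    (fun q => (c ++ (List.splitOnP (fun x => x == (0:Int)) t).headI) ++ q)).dropLast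

theorem pv_dropLast_modifyHead {α : Type} (f : α → α) (l : List α) :
    (l.modifyHead f).dropLast = l.dropLast.modifyHead f := by
  match l with
  | [] => rfl
  | [a] => rfl
  | a :: b :: tl => simp [List.modifyHead, List.dropLast]

theorem pv_stepA_zero_true (r : List (List Int)) (c : List Int) :
    pvStepA (r, c, true) 0 = (r, c, false) := by
  simp [pvStepA]

theorem pv_stepA_zero_false (r : List (List Int)) (c : List Int) :
    pvStepA (r, c, false) 0 = (r ++ [c], [], false) := by
  simp [pvStepA]

theorem pv_stepA_ne (st : List (List Int) × List Int × Bool) {x : Int} (hx : x ≠ 0) :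
    pvStepA st x = (st.1, st.2.1 ++ [x], st.2.2) := by
  simp [pvStepA, hx]

-- A's fold, characterized for both values of `first`
theorem pv_foldA (t : List Int) : ∀ (r : List (List Int)) (c : List Int),
    ((t.foldl pvStepA (r, c, false)).1
      = r ++ ((List.splitOnP (fun x => x == (0:Int)) t).modifyHead (fun q => c ++ q)).dropLast)
    ∧ ((t.foldl pvStepA (r, c, true)).1 = r ++ pvA2 c t) := by
  induction t with
  | nil => intro r c; simp [pvA2, List.splitOnP_nil, List.modifyHead]
  | cons x t ih =>
    intro r c
    by_cases hx : x = 0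
    · subst hx
      constructor
      · rw [List.foldl_cons, pv_stepA_zero_false, (ih (r ++ [c]) []).1]
        obtain ⟨q, qs, hq⟩ :=
          List.exists_cons_of_ne_nil (List.splitOnP_ne_nil (p := fun x => x == (0:Int)) t)
        rw [List.splitOnP_cons]
        simp [hq, List.modifyHead, List.dropLast_cons_of_ne_nil, List.append_assoc]
      · rw [List.foldl_cons, pv_stepA_zero_true, (ih r c).1, pvA2, List.splitOnP_cons]
        simp
    · constructor
      · rw [List.foldl_cons, pv_stepA_ne _ hx]
        rw [(ih r (c ++ [x])).1, List.splitOnP_cons]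
        simp only [show ((x == (0:Int)) = true) = False by simp [hx], if_false,
          List.modifyHead_modifyHead]
        rw [pv_dropLast_modifyHead, pv_dropLast_modifyHead]
        have hf : ((fun q => c ++ q) ∘ List.cons x) = (fun q : List Int => c ++ [x] ++ q) := by
          funext q; simp
        rw [hf]
      · rw [List.foldl_cons, pv_stepA_ne _ hx]
        rw [(ih r (c ++ [x])).2, pvA2, pvA2, List.splitOnP_cons]
        obtain ⟨q, qs, hq⟩ :=
          List.exists_cons_of_ne_nil (List.splitOnP_ne_nil (p := fun x => x == (0:Int)) t)
        rw [hq]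
        simp only [show ((x == (0:Int)) = true) = False by simp [hx], if_false,
          List.modifyHead]
        simp [List.append_assoc]

-- B's fold rewritten as pvPf (boundaries are Nat casts)
theorem pv_foldB (vec : List Int) (zsN : List Nat) :
    ∀ (acc : List (List Int)) (b : Nat),
    (((zsN.map (fun (n : Nat) => (n : Int))).foldl (pvStepB vec) (acc, (b : Int))).1)
      = acc ++ pvPf vec b zsN := by
  induction zsN with
  | nil => intro acc b; simp [pvPf]
  | cons z zs ih =>
    intro acc b
    simp only [List.map_cons, List.foldl_cons, pvStepB]
    rw [PySem.List.slice_natCast]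
    rw [ih (acc ++ [((vec.drop b).take (z - b)).filter (fun x => x != 0)]) z]
    simp [pvPf]

-- the enumerate/filter/map pipeline computes the zero positions
theorem pv_zeros_eq (vec : List Int) : ∀ (s : Int),
    ((PySem.List.enumerate vec s).filter (fun p => p.2 == 0)).map (fun p => p.1)
      = (pvZeros vec).map (fun (n : Nat) => (n : Int) + s) := by
  induction vec with
  | nil => intro s; simp [PySem.List.enumerate_nil, pvZeros]
  | cons x t ih =>
    intro s
    rw [PySem.List.enumerate_cons]
    by_cases hx : x = 0
    · subst hx
      rw [show pvZeros (0 :: t) = 0 :: (pvZeros t).map (· + 1) from by simp [pvZeros]]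
      rw [List.filter_cons_of_pos (by simp), List.map_cons, ih (s + 1), List.map_cons,
        List.map_map]
      refine congrArg₂ List.cons (by simp) (List.map_congr_left fun n _ => ?_)
      simp only [Function.comp_apply]
      push_cast
      ring
    · rw [show pvZeros (x :: t) = (pvZeros t).map (· + 1) from by simp [pvZeros, hx]]
      rw [List.filter_cons_of_neg (by simp [hx]), ih (s + 1), List.map_map]
      refine List.map_congr_left fun n _ => ?_
      simp only [Function.comp_apply]
      push_cast
      ring

-- shifting the list by one element shifts all boundaries
theorem pv_pf_shift (x : Int) (t : List Int) : ∀ (zs : List Nat) (b : Nat),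
    pvPf (x :: t) (b + 1) (zs.map (· + 1)) = pvPf t b zs := by
  intro zs
  induction zs with
  | nil => intro b; simp [pvPf]
  | cons z zs ih => intro b; simp [pvPf, ih, Nat.add_sub_add_right]

theorem pv_pf_head (x : Int) (t : List Int) (zs : List Nat) :
    pvPf (x :: t) 0 (zs.map (· + 1))
      = (pvPf t 0 zs).modifyHead (fun l => (if x = 0 then [] else [x]) ++ l) := by
  cases zs with
  | nil => simp [pvPf]
  | cons z zs =>
    simp only [List.map_cons, pvPf, pv_pf_shift, List.modifyHead]
    congr 1
    by_cases hx : x = 0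
    · simp [hx]
    · simp [hx]

-- main bridge: pvPf over the zero positions equals the splitOnP characterization
theorem pv_main (t : List Int) :
    (pvPf t 0 ((pvZeros t).drop 1) = pvA2 [] t)
    ∧ (pvPf t 0 (pvZeros t) = (List.splitOnP (fun x => x == (0:Int)) t).dropLast) := by
  induction t with
  | nil => constructor <;> simp [pvZeros, pvPf, pvA2, List.splitOnP_nil]
  | cons x t ih =>
    by_cases hx : x = 0
    · subst hx
      have hz : pvZeros ((0:Int) :: t) = 0 :: (pvZeros t).map (· + 1) := by simp [pvZeros]
      constructor
      · rw [hz, List.drop_one, List.tail_cons, pv_pf_head, if_pos rfl]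
        simp only [List.nil_append]
        rw [show (fun (l : List Int) => l) = id from rfl, List.modifyHead_id, ih.2, pvA2,
          List.splitOnP_cons]
        simp only [beq_self_eq_true, if_true, List.tail_cons, List.headI_cons, id_eq,
          List.nil_append]
        rw [show (fun (q : List Int) => q) = (id : List Int → List Int) from rfl,
          List.modifyHead_id]
        rfl
      · rw [hz]
        show ((((0:Int) :: t).drop 0).take 0).filter (fun x => x != 0)
            :: pvPf ((0:Int) :: t) 0 ((pvZeros t).map (· + 1)) = _
        rw [pv_pf_head, if_pos rfl]
        simp only [List.nil_append, List.take_zero, List.filter_nil]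
        rw [show (fun (l : List Int) => l) = id from rfl, List.modifyHead_id, ih.2,
          List.splitOnP_cons]
        simp only [beq_self_eq_true, if_true]
        rw [List.dropLast_cons_of_ne_nil (List.splitOnP_ne_nil (p := fun x => x == (0:Int)) t)]
        rfl
    · have hz : pvZeros (x :: t) = (pvZeros t).map (· + 1) := by simp [pvZeros, hx]
      constructor
      · rw [hz, ← List.map_drop, pv_pf_head, if_neg hx, ih.1, pvA2, pvA2, List.splitOnP_cons]
        obtain ⟨q, qs, hq⟩ :=
          List.exists_cons_of_ne_nil (List.splitOnP_ne_nil (p := fun x => x == (0:Int)) t)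
        rw [hq]
        simp only [show ((x == (0:Int)) = true) = False by simp [hx], if_false,
          List.modifyHead_cons, List.tail_cons, List.headI_cons]
        rw [pv_dropLast_modifyHead, pv_dropLast_modifyHead, List.modifyHead_modifyHead]
        have hf : ((fun l => [x] ++ l) ∘ (fun q' => ([] ++ q) ++ q'))
            = (fun q' : List Int => ([] ++ x :: q) ++ q') := by
          funext l; simp
        rw [hf]
      · rw [hz, pv_pf_head, if_neg hx, ih.2, List.splitOnP_cons]
        simp only [show ((x == (0:Int)) = true) = False by simp [hx], if_false]
        rw [pv_dropLast_modifyHead]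
        congr 1

-- ===== VERDICT (by name: the statement is the Claim_ definition above) =====
theorem decode_vector_spec : Claim_equal_decode_vector := by
  intro vec _
  show decode_vector vec = decode_vector_alt vec
  have hA : decode_vector vec = pvA2 [] vec := by
    unfold decode_vector
    exact (pv_foldA vec [] []).2.trans (by simp)
  have hB : decode_vector_alt vec = pvPf vec 0 ((pvZeros vec).drop 1) := by
    unfold decode_vector_alt
    have hz := pv_zeros_eq vec 0
    simp only [add_zero] at hz
    simp only [hz, ← List.map_drop]
    exact pv_foldB vec ((pvZeros vec).drop 1) [] 0
  rw [hA, hB, (pv_main vec).1]
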